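-- pv_equiv track=rewrite | github.com/pm4py/pm4py-core | pm4py/algo/anonymization/trace_variant_query/util/behavioralAppropriateness.py | getFollowsRelations
-- ===== SOURCE A (Python) =====
-- def getFollowersOfEventInTrace(event, trace):
--     followers = list()
--     if event not in trace:
--         return followers
--     eventIndex = trace.index(event)
--     restTrace = trace[eventIndex + 1:]
--     for e in restTrace:
--         if e not in followers:
--             followers.append(e)
--     return followers
--
-- def getFollowsRelations(allEvents, traces):
--     followsMatrix = {}
--     alwaysCtr = 0
--     sometimesCtr = len(allEvents) * len(allEvents)  # In the beginning, all relations are 'Sometimes'.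
--     neverCtr = 0
--
--     for event in allEvents:
--         alwaysFollows = allEvents.copy()
--         neverFollows = allEvents.copy()
--
--         for eClmn in allEvents:
--             followsMatrix[(event, eClmn)] = 'S'
--
--         for trace in traces:
--             if event in trace:
--                 followers = getFollowersOfEventInTrace(event=event, trace=trace)
--                 for f in followers:
--                     if f in neverFollows:
--                         neverFollows.remove(f)
--
--                 for e in allEvents:
--                     if e not in followers:
--                         if e in alwaysFollows:
--                             alwaysFollows.remove(e)
--
--         for a in alwaysFollows:
--             followsMatrix[(event, a)] = 'A'
--             sometimesCtr -= 1
--             alwaysCtr += 1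
--
--         for n in neverFollows:
--             followsMatrix[(event, n)] = 'N'
--             sometimesCtr -= 1
--             neverCtr += 1
--
--     return followsMatrix
-- ===== SOURCE B (Python) =====
-- def getFollowsRelations(allEvents, traces):
--     # One tabulation pass over the traces: for each distinct event of a trace,
--     # count the trace (traceCount) and count each event of its first-occurrence
--     # follower set (follows); then label every cell from the two counters.
--     follows = {}
--     traceCount = {}
--     for trace in traces:
--         for e in set(trace):
--             traceCount[e] = traceCount.get(e, 0) + 1
--             for f in set(trace[trace.index(e) + 1:]):
--                 follows[(e, f)] = follows.get((e, f), 0) + 1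
--     result = {}
--     for e1 in allEvents:
--         tc = traceCount.get(e1, 0)
--         for e2 in allEvents:
--             c = follows.get((e1, e2), 0)
--             result[(e1, e2)] = 'N' if c == 0 else ('A' if c == tc else 'S')
--     return result
-- ===== Notes on version B (the rewrite author's own statement) =====
-- stated objective: alternative
-- what changed: Replaces A's per-event rescan of all traces with list.remove bookkeeping by a single tabulation pass that counts, for each distinct event of each trace, its containing traces and its first-occurrence followers, then labels every (e1,e2) cell directly from the two counters (O(E^2*T*L) work becomes O(T*L^2 + E^2), though a timing run could not verify this inside Pre_).
-- outside the precondition, e.g. on getFollowsRelations(['a', 'a'], [['a', 'a']]): A returns {('a', 'a'): 'N'}, B returns {('a', 'a'): 'A'}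
import Mathlib
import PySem

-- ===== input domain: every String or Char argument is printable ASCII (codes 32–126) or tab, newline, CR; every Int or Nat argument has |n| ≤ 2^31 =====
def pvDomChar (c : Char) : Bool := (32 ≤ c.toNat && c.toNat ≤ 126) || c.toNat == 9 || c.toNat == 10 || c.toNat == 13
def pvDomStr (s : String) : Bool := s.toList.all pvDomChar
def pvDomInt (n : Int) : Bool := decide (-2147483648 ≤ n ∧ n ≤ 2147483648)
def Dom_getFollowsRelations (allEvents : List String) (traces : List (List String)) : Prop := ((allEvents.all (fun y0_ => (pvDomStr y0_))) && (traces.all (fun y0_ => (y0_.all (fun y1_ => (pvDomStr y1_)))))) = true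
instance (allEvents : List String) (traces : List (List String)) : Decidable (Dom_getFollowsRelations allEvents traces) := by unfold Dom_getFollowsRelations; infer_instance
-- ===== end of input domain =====

-- B replaces A's per-event rescanning of all traces by one counting pass over the traces
-- plus a direct labelling of each matrix cell from the counters (objective: alternative).


-- ===== PORT A =====
-- helper of A: the body of 'for e in restTrace: if e not in followers: followers.append(e)'
def pvA_followersStep (followers : List String) (e : String) : List String :=
  if e ∈ followers then followers else followers ++ [e]

def getFollowersOfEventInTrace (event : String) (trace : List String) : List String :=
  if event ∈ trace then
    let eventIndex := (PySem.List.index? trace event).getD 0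
    let restTrace := PySem.List.slice trace (some ((eventIndex : Int) + 1)) none
    restTrace.foldl pvA_followersStep []
  else []   -- 'if event not in trace: return followers' (empty)

-- 'if f in neverFollows: neverFollows.remove(f)'  (list.remove = erase first occurrence)
def pvA_nfStep (nf : List String) (f : String) : List String :=
  if f ∈ nf then nf.erase f else nf

-- 'if e not in followers: if e in alwaysFollows: alwaysFollows.remove(e)'
def pvA_afStep (followers : List String) (af : List String) (e : String) : List String :=
  if e ∉ followers then (if e ∈ af then af.erase e else af) else af

-- body of 'for trace in traces:' acting on the pair (alwaysFollows, neverFollows)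
def pvA_traceStep (allEvents : List String) (event : String)
    (st : List String × List String) (trace : List String) : List String × List String :=
  if event ∈ trace then
    let followers := getFollowersOfEventInTrace event trace
    (allEvents.foldl (pvA_afStep followers) st.1, followers.foldl pvA_nfStep st.2)
  else st

-- body of the outer 'for event in allEvents:' loop acting on followsMatrix
def pvA_eventBlock (allEvents : List String) (traces : List (List String))
    (fm : PySem.Dict (String × String) String) (event : String) :
    PySem.Dict (String × String) String :=
  let fm1 := allEvents.foldl (fun fm eClmn => fm.insert (event, eClmn) "S") fm
  let st := traces.foldl (pvA_traceStep allEvents event) (allEvents, allEvents)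
  let fm2 := st.1.foldl (fun fm a => fm.insert (event, a) "A") fm1
  st.2.foldl (fun fm n => fm.insert (event, n) "N") fm2

-- the counters alwaysCtr/sometimesCtr/neverCtr of the Python are dead state (never returned); omitted
def getFollowsRelations (allEvents : List String) (traces : List (List String)) :
    List (String × String × String) :=
  ((allEvents.foldl (pvA_eventBlock allEvents traces) PySem.Dict.empty).items).map
    (fun p => (p.1.1, p.1.2, p.2))

-- ===== PORT B =====
-- one trace's tabulation: for each distinct event e of the trace, count the trace for e
-- and count every member of e's first-occurrence follower set
-- "for f in set(trace[trace.index(e) + 1:]): follows[(e,f)] = follows.get((e,f),0) + 1"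
def pvB_flStep (trace : List String) (fl : PySem.Dict (String × String) Int) (e : String) :
    PySem.Dict (String × String) Int :=
  (PySem.Set.ofList (PySem.List.slice trace
      (some (((PySem.List.index? trace e).getD 0 : Int) + 1)) none)).foldl
    (fun fl f => fl.modify (e, f) 0 (· + 1)) fl

-- "traceCount[e] = traceCount.get(e, 0) + 1"
def pvB_tcStep (tc : PySem.Dict String Int) (e : String) : PySem.Dict String Int :=
  tc.modify e 0 (· + 1)

def pvB_tabStep (st : PySem.Dict (String × String) Int × PySem.Dict String Int)
    (trace : List String) : PySem.Dict (String × String) Int × PySem.Dict String Int :=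
  (PySem.Set.ofList trace).foldl (fun st e => (pvB_flStep trace st.1 e, pvB_tcStep st.2 e)) st

def getFollowsRelations_alt (allEvents : List String) (traces : List (List String)) :
    List (String × String × String) :=
  let st := traces.foldl pvB_tabStep (PySem.Dict.empty, PySem.Dict.empty)
  let result := allEvents.foldl (fun res e1 =>
      let tc := st.2.getD e1 0
      allEvents.foldl (fun res e2 =>
        let c := st.1.getD (e1, e2) 0
        res.insert (e1, e2) (if c == 0 then "N" else if c == tc then "A" else "S")) res)
    PySem.Dict.empty
  result.items.map (fun p => (p.1.1, p.1.2, p.2))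

-- ===== PRECONDITION & SPEC =====
-- Pre_ excludes allEvents lists with duplicate entries: there A's labels depend on how many
-- copies of an event allEvents holds (each list.remove deletes one copy), an accident of the
-- mutable-list bookkeeping that no caller of an event-alphabet function would specify.
def Pre_getFollowsRelations (allEvents : List String) (traces : List (List String)) : Prop :=
  allEvents.Nodup
instance (allEvents : List String) (traces : List (List String)) :
    Decidable (Pre_getFollowsRelations allEvents traces) := by
  unfold Pre_getFollowsRelations; infer_instance

def pvWitness_getFollowsRelations : List String × List (List String) :=
  (["a", "b"], [["a", "b"], ["b"]])

def Spec_getFollowsRelations (allEvents : List String) (traces : List (List String))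
    (out : List (String × String × String)) : Prop :=
  out = getFollowsRelations_alt allEvents traces
instance (allEvents : List String) (traces : List (List String))
    (out : List (String × String × String)) :
    Decidable (Spec_getFollowsRelations allEvents traces out) := by
  unfold Spec_getFollowsRelations; infer_instance

-- ===== CLAIM (what is proved, stated in full; the proofs are below) =====
def Claim_equal_getFollowsRelations : Prop :=
  ∀ (allEvents : List String) (traces : List (List String)),
    Dom_getFollowsRelations allEvents traces →
    Pre_getFollowsRelations allEvents traces →
    Spec_getFollowsRelations allEvents traces (getFollowsRelations allEvents traces)

-- ===== LEMMAS AND PROOFS =====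

-- the (deduplicated, ordered) first-occurrence follower set of e in t, as both ports compute it
def folB (e : String) (t : List String) : List String :=
  PySem.Set.ofList (PySem.List.slice t
    (some (((PySem.List.index? t e).getD 0 : Int) + 1)) none)

-- 'e2 follows e1 in trace t'
def hitB (e1 e2 : String) (t : List String) : Bool :=
  decide (e1 ∈ t) && decide (e2 ∈ folB e1 t)

def cntN (e1 e2 : String) (ts : List (List String)) : Nat := ts.countP (hitB e1 e2)
def tcN (e1 : String) (ts : List (List String)) : Nat :=
  ts.countP (fun t => decide (e1 ∈ t))

-- 'e2 never follows e1' / 'e2 always follows e1 (in traces containing e1)'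
def pN (e1 e2 : String) (ts : List (List String)) : Bool :=
  ts.all (fun t => !hitB e1 e2 t)
def pA (e1 e2 : String) (ts : List (List String)) : Bool :=
  ts.all (fun t => !(decide (e1 ∈ t)) || hitB e1 e2 t)

def labT (ts : List (List String)) (e1 e2 : String) : String :=
  if pN e1 e2 ts then "N" else if pA e1 e2 ts then "A" else "S"

def targetItems (allEvents : List String) (ts : List (List String)) :
    List ((String × String) × String) :=
  allEvents.flatMap (fun e1 => allEvents.map (fun e2 => ((e1, e2), labT ts e1 e2)))

lemma foldl_followersStep (xs : List String) :
    xs.foldl pvA_followersStep [] = PySem.Set.ofList xs := by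
  rw [PySem.Set.ofList_eq_foldl]
  congr 1
  funext s e
  simp [pvA_followersStep, PySem.Set.add_eq_ite]

lemma followers_eq (event : String) (trace : List String) (h : event ∈ trace) :
    getFollowersOfEventInTrace event trace = folB event trace := by
  simp only [getFollowersOfEventInTrace, folB, if_pos h]
  exact foldl_followersStep _

lemma nf_fold (fs : List String) : ∀ (l : List String), l.Nodup →
    fs.foldl pvA_nfStep l = l.filter (fun x => decide (x ∉ fs)) := by
  induction fs with
  | nil => intro l _; simp
  | cons f fs ih =>
    intro l hl
    have hstep : pvA_nfStep l f = l.filter (fun x => decide (x ≠ f)) := by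
      by_cases h : f ∈ l
      · simp only [pvA_nfStep, if_pos h, List.Nodup.erase_eq_filter hl]
        exact List.filter_congr (fun x _ => by by_cases hx : x = f <;> simp [hx, bne])
      · simp only [pvA_nfStep, if_neg h]
        exact (List.filter_eq_self.2 (fun a ha => by simp; rintro rfl; exact h ha)).symm
    rw [List.foldl_cons, hstep, ih _ (hl.filter _)]
    rw [List.filter_filter]
    exact List.filter_congr (fun x _ => by simp [Bool.and_comm])

lemma af_fold (fol : List String) (evs : List String) : ∀ (af : List String), af.Nodup →
    evs.foldl (pvA_afStep fol) af = af.filter (fun x => decide (x ∉ evs) || decide (x ∈ fol)) := by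
  induction evs with
  | nil => intro af _; simp
  | cons e evs ih =>
    intro af haf
    have hstep : pvA_afStep fol af e
        = af.filter (fun x => decide (x ≠ e) || decide (x ∈ fol)) := by
      by_cases hf : e ∈ fol
      · simp only [pvA_afStep, if_neg (not_not_intro hf)]
        exact (List.filter_eq_self.2 (fun a ha => by by_cases h : a = e <;> simp [h, hf])).symm
      · simp only [pvA_afStep, if_pos hf]
        by_cases h : e ∈ af
        · simp only [if_pos h, List.Nodup.erase_eq_filter haf]
          exact List.filter_congr (fun x hx => by
            by_cases hxe : x = e
            · subst hxe; simp [hf, bne]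
            · simp [hxe, bne])
        · simp only [if_neg h]
          exact (List.filter_eq_self.2 (fun a ha => by
            by_cases hxe : a = e
            · subst hxe; exact absurd ha h
            · simp [hxe])).symm
    rw [List.foldl_cons, hstep, ih _ (haf.filter _)]
    rw [List.filter_filter]
    exact List.filter_congr (fun x _ => by
      by_cases h1 : x = e <;> by_cases h2 : x ∈ fol <;> by_cases h3 : x ∈ evs <;>
        simp [h1, h2, h3] <;> tauto)

lemma trace_fold (allEvents : List String) (event : String) (hA : allEvents.Nodup)
    (ts : List (List String)) : ∀ (p q : String → Bool),
    ts.foldl (pvA_traceStep allEvents event) (allEvents.filter p, allEvents.filter q)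
      = (allEvents.filter (fun x => p x && pA event x ts),
         allEvents.filter (fun x => q x && pN event x ts)) := by
  induction ts with
  | nil => intro p q; simp [pA, pN]
  | cons t ts ih =>
    intro p q
    rw [List.foldl_cons]
    by_cases h : event ∈ t
    · have hstep : pvA_traceStep allEvents event (allEvents.filter p, allEvents.filter q) t
          = (allEvents.filter (fun x => p x && hitB event x t),
             allEvents.filter (fun x => q x && !hitB event x t)) := by
        simp only [pvA_traceStep, if_pos h, followers_eq event t h]
        refine Prod.ext ?_ ?_
        · show allEvents.foldl (pvA_afStep (folB event t)) (allEvents.filter p) = _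
          rw [af_fold _ _ _ (hA.filter _), List.filter_filter]
          exact List.filter_congr (fun x hx => by simp [hx, hitB, h, Bool.and_comm])
        · show (folB event t).foldl pvA_nfStep (allEvents.filter q) = _
          rw [nf_fold _ _ (hA.filter _), List.filter_filter]
          exact List.filter_congr (fun x _ => by simp [hitB, h, Bool.and_comm])
      rw [hstep, ih]
      refine Prod.ext ?_ ?_ <;>
        · apply List.filter_congr
          intro x _
          simp [pA, pN, hitB, h, Bool.and_assoc]
    · have hstep : pvA_traceStep allEvents event (allEvents.filter p, allEvents.filter q) t
          = (allEvents.filter p, allEvents.filter q) := by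
        simp only [pvA_traceStep, if_neg h]
      rw [hstep, ih]
      refine Prod.ext ?_ ?_ <;>
        · apply List.filter_congr
          intro x _
          simp [pA, pN, hitB, h]

lemma overwrite_items (event : String) (v : String) (sub : List String) :
    ∀ (d : PySem.Dict (String × String) String), d.keys.Nodup →
    (∀ a ∈ sub, d.contains (event, a) = true) →
    (sub.foldl (fun fm a => fm.insert (event, a) v) d).items
      = d.items.map (fun p => if p.1.1 = event ∧ p.1.2 ∈ sub then (p.1, v) else p) := by
  induction sub with
  | nil => intro d _ _; simp
  | cons a sub ih =>
    intro d hk hc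
    have hca : d.contains (event, a) = true := hc a List.mem_cons_self
    rw [List.foldl_cons]
    have hkeys : (d.insert (event, a) v).keys = d.keys :=
      PySem.Dict.keys_insert_of_contains d v hca
    have hk' : (d.insert (event, a) v).keys.Nodup := by rw [hkeys]; exact hk
    have hc' : ∀ b ∈ sub, (d.insert (event, a) v).contains (event, b) = true := by
      intro b hb
      rw [PySem.Dict.contains_insert]
      simp [hc b (List.mem_cons_of_mem _ hb)]
    rw [ih _ hk' hc']
    rw [PySem.Dict.items_insert_of_contains d v hca, List.map_map]
    refine List.map_congr_left fun p _ => ?_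
    by_cases hpa : p.1 = (event, a)
    · simp only [Function.comp_apply, hpa, beq_self_eq_true, if_true]
      by_cases hs : a ∈ sub <;> simp [hs, hpa]
    · have hbeq : (p.1 == (event, a)) = false := by simp [hpa]
      simp only [Function.comp_apply, hbeq, Bool.false_eq_true, if_false]
      by_cases h1 : p.1.1 = event
      · by_cases h2 : p.1.2 = a
        · exact absurd (Prod.ext h1 h2) hpa
        · simp [h1, h2]
      · simp [h1]

lemma blockA_items (allEvents : List String) (traces : List (List String)) (event : String)
    (hA : allEvents.Nodup) (d : PySem.Dict (String × String) String)
    (hk : d.keys.Nodup) (hdisj : ∀ k ∈ d.keys, k.1 ≠ event) :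
    (pvA_eventBlock allEvents traces d event).items
      = d.items ++ allEvents.map (fun c => ((event, c), labT traces event c)) := by
  unfold pvA_eventBlock
  have hinj : Function.Injective (fun c => ((event : String), (c : String))) :=
    fun a b h => congrArg Prod.snd h
  have hmapnd : (allEvents.map (fun c => ((event : String), c))).Nodup := hA.map hinj
  have hfresh : ∀ c ∈ allEvents, d.contains (event, c) = false := by
    intro c _
    exact Bool.eq_false_iff.mpr
      (fun h => hdisj _ ((PySem.Dict.contains_iff_mem_keys _ _).mp h) rfl)
  have h1 : (allEvents.foldl (fun fm eClmn => fm.insert (event, eClmn) "S") d).items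
      = d.items ++ allEvents.map (fun c => ((event, c), "S")) := by
    exact PySem.Dict.items_foldl_insert_fresh allEvents _ _ d hfresh hmapnd
  set fm1 := allEvents.foldl (fun fm eClmn => fm.insert (event, eClmn) "S") d with hfm1
  have hkeys1 : fm1.keys = d.keys ++ allEvents.map (fun c => ((event : String), c)) := by
    simp only [PySem.Dict.keys, h1, List.map_append, List.map_map]
    rfl
  have hk1 : fm1.keys.Nodup := by
    rw [hkeys1]
    refine hk.append hmapnd ?_
    intro k hk1m hk2m
    rcases List.mem_map.mp hk2m with ⟨c, _, rfl⟩
    exact hdisj _ hk1m rfl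
  have hst : traces.foldl (pvA_traceStep allEvents event) (allEvents, allEvents)
      = (allEvents.filter (fun x => pA event x traces),
         allEvents.filter (fun x => pN event x traces)) := by
    have h := trace_fold allEvents event hA traces (fun _ => true) (fun _ => true)
    simpa using h
  rw [hst]
  have hmemkeys : ∀ a ∈ allEvents, fm1.contains ((event : String), a) = true := by
    intro a ha
    exact (PySem.Dict.contains_iff_mem_keys _ _).mpr
      (by rw [hkeys1]; exact List.mem_append_right _ (List.mem_map_of_mem ha))
  have h2 : (((allEvents.filter (fun x => pA event x traces)).foldl
        (fun fm a => fm.insert (event, a) "A") fm1)).items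
      = fm1.items.map
          (fun p => if p.1.1 = event ∧ p.1.2 ∈ allEvents.filter (fun x => pA event x traces)
            then (p.1, "A") else p) :=
    overwrite_items event "A" _ fm1 hk1
      (fun a ha => hmemkeys a (List.mem_of_mem_filter ha))
  set fm2 := (allEvents.filter (fun x => pA event x traces)).foldl
      (fun fm a => fm.insert (event, a) "A") fm1 with hfm2
  have hkeys2 : fm2.keys = fm1.keys := by
    simp only [PySem.Dict.keys, h2, List.map_map]
    refine List.map_congr_left fun p _ => ?_
    simp only [Function.comp_apply]
    split <;> rfl
  have hk2 : fm2.keys.Nodup := by rw [hkeys2]; exact hk1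
  have h3 : (((allEvents.filter (fun x => pN event x traces)).foldl
        (fun fm a => fm.insert (event, a) "N") fm2)).items
      = fm2.items.map
          (fun p => if p.1.1 = event ∧ p.1.2 ∈ allEvents.filter (fun x => pN event x traces)
            then (p.1, "N") else p) :=
    overwrite_items event "N" _ fm2 hk2
      (fun a ha => by
        rw [PySem.Dict.contains_eq_decide_mem_keys, hkeys2]
        have := (PySem.Dict.contains_iff_mem_keys _ _).mp (hmemkeys a (List.mem_of_mem_filter ha))
        simp [this])
  rw [h3, h2, h1, List.map_append, List.map_append, List.map_map, List.map_map]
  congr 1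
  · -- old entries untouched
    refine (List.map_congr_left fun p hp => ?_).trans (List.map_id _)
    have hne : p.1.1 ≠ event := hdisj p.1 (List.mem_map_of_mem hp)
    simp [hne]
  · -- the event's block gets its labels
    rw [List.map_map]
    refine List.map_congr_left fun c hc => ?_
    simp only [Function.comp_apply, labT]
    by_cases hn : pN event c traces = true
    · by_cases ha2 : pA event c traces = true <;> simp [hn, ha2, hc]
    · by_cases ha2 : pA event c traces = true <;> simp [hn, ha2, hc]

lemma outerA_items (allEvents : List String) (traces : List (List String))
    (hA : allEvents.Nodup) : ∀ (evs : List String), evs.Nodup →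
    ∀ (d : PySem.Dict (String × String) String), d.keys.Nodup →
    (∀ k ∈ d.keys, k.1 ∉ evs) →
    (evs.foldl (pvA_eventBlock allEvents traces) d).items
      = d.items ++ evs.flatMap (fun e1 => allEvents.map (fun c => ((e1, c), labT traces e1 c))) := by
  intro evs
  induction evs with
  | nil => intro _ d _ _; simp
  | cons event evs ih =>
    intro hnd d hk hdisj
    have hevnd := List.nodup_cons.mp hnd
    rw [List.foldl_cons]
    have hd1 : ∀ k ∈ d.keys, k.1 ≠ event := by
      intro k hkm h
      exact hdisj k hkm (h ▸ List.mem_cons_self)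
    have hb := blockA_items allEvents traces event hA d hk hd1
    have hkeys' : (pvA_eventBlock allEvents traces d event).keys
        = d.keys ++ allEvents.map (fun c => ((event : String), c)) := by
      simp only [PySem.Dict.keys, hb, List.map_append, List.map_map]
      rfl
    have hinj : Function.Injective (fun c => ((event : String), (c : String))) :=
      fun a b h => congrArg Prod.snd h
    have hk' : (pvA_eventBlock allEvents traces d event).keys.Nodup := by
      rw [hkeys']
      refine hk.append (hA.map hinj) ?_
      intro k hk1m hk2m
      rcases List.mem_map.mp hk2m with ⟨c, _, rfl⟩
      exact hd1 _ hk1m rfl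
    have hdisj' : ∀ k ∈ (pvA_eventBlock allEvents traces d event).keys, k.1 ∉ evs := by
      intro k hkm
      rw [hkeys'] at hkm
      rcases List.mem_append.mp hkm with h | h
      · exact fun hmem => hdisj k h (List.mem_cons_of_mem _ hmem)
      · rcases List.mem_map.mp h with ⟨c, _, rfl⟩
        exact hevnd.1
    rw [ih hevnd.2 _ hk' hdisj', hb]
    rw [List.flatMap_cons, List.append_assoc]

lemma tabStep_eq (st : PySem.Dict (String × String) Int × PySem.Dict String Int)
    (t : List String) :
    pvB_tabStep st t
      = ((PySem.Set.ofList t).foldl (pvB_flStep t) st.1,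
         (PySem.Set.ofList t).foldl pvB_tcStep st.2) := by
  obtain ⟨a, b⟩ := st
  exact PySem.List.foldl_prod_mk (pvB_flStep t) pvB_tcStep _ a b

lemma count_nodup : ∀ {l : List String}, l.Nodup → ∀ (v : String),
    l.count v = if v ∈ l then 1 else 0 := by
  intro l
  induction l with
  | nil => intro _ v; simp
  | cons a l ih =>
    intro hnd v
    have ha : a ∉ l := (List.nodup_cons.mp hnd).1
    rw [List.count_cons, ih (List.nodup_cons.mp hnd).2 v]
    by_cases hv : v = a
    · subst hv; simp [ha]
    · simp [hv, Ne.symm hv]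

lemma tc_fold_getD (t : List String) (tc : PySem.Dict String Int) (e1 : String) :
    ((PySem.Set.ofList t).foldl pvB_tcStep tc).getD e1 0
      = tc.getD e1 0 + (if e1 ∈ t then 1 else 0) := by
  unfold pvB_tcStep
  rw [PySem.Dict.getD_foldl_modify_add_one]
  rw [count_nodup (PySem.Set.nodup_ofList t) e1]
  by_cases h : e1 ∈ t <;> simp [PySem.Set.mem_ofList, h]

lemma tab_snd (e1 : String) (ts : List (List String)) :
    ∀ (st : PySem.Dict (String × String) Int × PySem.Dict String Int),
    (ts.foldl pvB_tabStep st).2.getD e1 0 = st.2.getD e1 0 + (tcN e1 ts : Int) := by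
  induction ts with
  | nil => intro st; simp [tcN]
  | cons t ts ih =>
    intro st
    rw [List.foldl_cons, ih (pvB_tabStep st t), tabStep_eq]
    rw [tc_fold_getD]
    rw [tcN, tcN, List.countP_cons]
    by_cases h : e1 ∈ t <;> simp [h] <;> push_cast <;> omega

lemma inner_fold_getD (e e1 e2 : String) : ∀ (l : List String)
    (d : PySem.Dict (String × String) Int),
    (l.foldl (fun fl f => fl.modify (e, f) 0 (· + 1)) d).getD (e1, e2) 0
      = d.getD (e1, e2) 0 + (if e = e1 then (l.count e2 : Int) else 0) := by
  intro l
  induction l with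
  | nil => intro d; simp
  | cons f l ih =>
    intro d
    rw [List.foldl_cons, ih, PySem.Dict.getD_modify]
    by_cases he : e = e1
    · subst he
      by_cases hf : e2 = f
      · subst hf; simp [List.count_cons]; omega
      · simp [Prod.ext_iff, hf, List.count_cons, Ne.symm hf]
    · rw [if_neg (fun h => he ((Prod.ext_iff.mp h).1.symm)), if_neg he, if_neg he]

lemma flStep_getD (t : List String) (e e1 e2 : String)
    (fl : PySem.Dict (String × String) Int) :
    (pvB_flStep t fl e).getD (e1, e2) 0
      = fl.getD (e1, e2) 0 + (if e = e1 ∧ e2 ∈ folB e1 t then 1 else 0) := by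
  unfold pvB_flStep
  rw [show (PySem.Set.ofList (PySem.List.slice t
      (some (((PySem.List.index? t e).getD 0 : Int) + 1)) none)) = folB e t from rfl]
  rw [inner_fold_getD]
  have hnd : (folB e1 t).Nodup := PySem.Set.nodup_ofList _
  by_cases he : e = e1
  · subst he
    rw [count_nodup hnd e2]
    by_cases h2 : e2 ∈ folB e t <;> simp [h2]
  · simp [he]

lemma fl_fold_getD (t : List String) (e1 e2 : String) :
    ∀ (l : List String), l.Nodup → ∀ (fl : PySem.Dict (String × String) Int),
    (l.foldl (pvB_flStep t) fl).getD (e1, e2) 0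
      = fl.getD (e1, e2) 0 + (if e1 ∈ l ∧ e2 ∈ folB e1 t then 1 else 0) := by
  intro l
  induction l with
  | nil => intro _ fl; simp
  | cons e l ih =>
    intro hnd fl
    have he : e ∉ l := (List.nodup_cons.mp hnd).1
    rw [List.foldl_cons, ih (List.nodup_cons.mp hnd).2, flStep_getD]
    by_cases h1 : e = e1
    · subst h1
      simp only [List.mem_cons, true_or, true_and]
      by_cases h2 : e2 ∈ folB e t <;> simp [h2, he] <;> omega
    · simp only [List.mem_cons]
      have : (e1 = e ∨ e1 ∈ l) ↔ e1 ∈ l := by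
        constructor
        · rintro (rfl | h) ; exact absurd rfl h1; exact h
        · exact Or.inr
      simp only [h1, false_and, if_false, add_zero, this]

lemma tab_fst (e1 e2 : String) (ts : List (List String)) :
    ∀ (st : PySem.Dict (String × String) Int × PySem.Dict String Int),
    (ts.foldl pvB_tabStep st).1.getD (e1, e2) 0 = st.1.getD (e1, e2) 0 + (cntN e1 e2 ts : Int) := by
  induction ts with
  | nil => intro st; simp [cntN]
  | cons t ts ih =>
    intro st
    rw [List.foldl_cons, ih (pvB_tabStep st t), tabStep_eq]
    rw [fl_fold_getD t e1 e2 _ (PySem.Set.nodup_ofList t)]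
    rw [cntN, cntN, List.countP_cons]
    have hmem : e1 ∈ PySem.Set.ofList t ↔ e1 ∈ t := PySem.Set.mem_ofList t e1
    by_cases h1 : e1 ∈ t <;> by_cases h2 : e2 ∈ folB e1 t <;>
      simp [hitB, h1, h2, hmem] <;> push_cast <;> omega

lemma cnt_zero_iff (e1 e2 : String) (ts : List (List String)) :
    cntN e1 e2 ts = 0 ↔ pN e1 e2 ts = true := by
  rw [cntN, List.countP_eq_zero, pN, List.all_eq_true]
  simp

lemma hitB_mem (e1 e2 : String) (t : List String) (h : hitB e1 e2 t = true) :
    decide (e1 ∈ t) = true := by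
  rw [hitB, Bool.and_eq_true] at h
  exact h.1

lemma cnt_le_tc (e1 e2 : String) (ts : List (List String)) : cntN e1 e2 ts ≤ tcN e1 ts :=
  List.countP_mono_left (fun t _ h => hitB_mem e1 e2 t h)

lemma cnt_tc_iff (e1 e2 : String) (ts : List (List String)) :
    cntN e1 e2 ts = tcN e1 ts ↔ pA e1 e2 ts = true := by
  induction ts with
  | nil => simp [cntN, tcN, pA]
  | cons t ts ih =>
    have hle := cnt_le_tc e1 e2 ts
    have hmem := hitB_mem e1 e2 t
    rw [cntN, tcN, List.countP_cons, List.countP_cons, pA, List.all_cons, Bool.and_eq_true]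
    rw [cntN, tcN] at hle ih
    by_cases hh : hitB e1 e2 t = true
    · have hm := hmem hh
      simp only [hh, hm, if_true, Bool.not_true, Bool.false_or, true_and]
      rw [show (ts.all fun t => !decide (e1 ∈ t) || hitB e1 e2 t) = pA e1 e2 ts from rfl, ← ih]
      exact ⟨fun h => by omega, fun h => by omega⟩
    · by_cases hm : decide (e1 ∈ t) = true
      · simp only [hh, hm, if_false, if_true, Bool.not_true, Bool.false_or,
          Bool.false_eq_true, false_and, iff_false]
        omega
      · simp only [Bool.not_eq_true] at hm
        simp only [hh, hm, if_false, Bool.not_false, Bool.true_or, true_and,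
          Nat.add_zero]
        rw [show (ts.all fun t => !decide (e1 ∈ t) || hitB e1 e2 t) = pA e1 e2 ts from rfl]
        exact ih

-- the label B computes for cell (e1, e2), with the tabulated counters
def labB (ts : List (List String)) (e1 e2 : String) : String :=
  if ((ts.foldl pvB_tabStep (PySem.Dict.empty, PySem.Dict.empty)).1.getD (e1, e2) 0) == 0 then "N"
  else if ((ts.foldl pvB_tabStep (PySem.Dict.empty, PySem.Dict.empty)).1.getD (e1, e2) 0)
      == ((ts.foldl pvB_tabStep (PySem.Dict.empty, PySem.Dict.empty)).2.getD e1 0) then "A"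
  else "S"

lemma labB_eq (ts : List (List String)) (e1 e2 : String) : labB ts e1 e2 = labT ts e1 e2 := by
  have h1 : (ts.foldl pvB_tabStep (PySem.Dict.empty, PySem.Dict.empty)).1.getD (e1, e2) 0
      = (cntN e1 e2 ts : Int) := by
    rw [tab_fst]; simp [PySem.Dict.getD_empty]
  have h2 : (ts.foldl pvB_tabStep (PySem.Dict.empty, PySem.Dict.empty)).2.getD e1 0
      = (tcN e1 ts : Int) := by
    rw [tab_snd]; simp [PySem.Dict.getD_empty]
  rw [labB, labT, h1, h2]
  by_cases hn : pN e1 e2 ts = true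
  · have hz : cntN e1 e2 ts = 0 := (cnt_zero_iff e1 e2 ts).mpr hn
    simp [hn, hz]
  · have hz : cntN e1 e2 ts ≠ 0 := fun h => hn ((cnt_zero_iff e1 e2 ts).mp h)
    by_cases ha : pA e1 e2 ts = true
    · have h3 : cntN e1 e2 ts = tcN e1 ts := (cnt_tc_iff e1 e2 ts).mpr ha
      rw [h3] at hz
      simp [hn, ha, h3, hz]
    · have h3 : cntN e1 e2 ts ≠ tcN e1 ts := fun h => ha ((cnt_tc_iff e1 e2 ts).mp h)
      have hzi : ((cntN e1 e2 ts : Int) == 0) = false := by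
        simp; exact_mod_cast hz
      have h3i : ((cntN e1 e2 ts : Int) == (tcN e1 ts : Int)) = false := by
        simp; exact_mod_cast h3
      simp [hn, ha, hzi, h3i]

lemma outerB_items (allEvents : List String) (hA : allEvents.Nodup)
    (lab : String → String → String) :
    ∀ (evs : List String), evs.Nodup →
    ∀ (d : PySem.Dict (String × String) String), d.keys.Nodup →
    (∀ k ∈ d.keys, k.1 ∉ evs) →
    (evs.foldl (fun res e1 =>
        allEvents.foldl (fun res e2 => res.insert (e1, e2) (lab e1 e2)) res) d).items
      = d.items ++ evs.flatMap (fun e1 => allEvents.map (fun e2 => ((e1, e2), lab e1 e2))) := by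
  intro evs
  induction evs with
  | nil => intro _ d _ _; simp
  | cons e1 evs ih =>
    intro hnd d hk hdisj
    have hevnd := List.nodup_cons.mp hnd
    rw [List.foldl_cons]
    have hinj : Function.Injective (fun c => ((e1 : String), (c : String))) :=
      fun a b h => congrArg Prod.snd h
    have hfresh : ∀ c ∈ allEvents, d.contains (e1, c) = false := by
      intro c _
      exact Bool.eq_false_iff.mpr (fun h =>
        hdisj _ ((PySem.Dict.contains_iff_mem_keys _ _).mp h) List.mem_cons_self)
    have h1 : (allEvents.foldl (fun res e2 => res.insert (e1, e2) (lab e1 e2)) d).items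
        = d.items ++ allEvents.map (fun e2 => ((e1, e2), lab e1 e2)) :=
      PySem.Dict.items_foldl_insert_fresh allEvents _ _ d hfresh (hA.map hinj)
    have hkeys1 : (allEvents.foldl (fun res e2 => res.insert (e1, e2) (lab e1 e2)) d).keys
        = d.keys ++ allEvents.map (fun c => ((e1 : String), c)) := by
      simp only [PySem.Dict.keys, h1, List.map_append, List.map_map]
      rfl
    have hk1 : (allEvents.foldl (fun res e2 => res.insert (e1, e2) (lab e1 e2)) d).keys.Nodup := by
      rw [hkeys1]
      refine hk.append (hA.map hinj) ?_
      intro k hk1m hk2m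
      rcases List.mem_map.mp hk2m with ⟨c, _, rfl⟩
      exact hdisj _ hk1m List.mem_cons_self
    have hdisj1 : ∀ k ∈ (allEvents.foldl
        (fun res e2 => res.insert (e1, e2) (lab e1 e2)) d).keys, k.1 ∉ evs := by
      intro k hkm
      rw [hkeys1] at hkm
      rcases List.mem_append.mp hkm with h | h
      · exact fun hm => hdisj k h (List.mem_cons_of_mem _ hm)
      · rcases List.mem_map.mp h with ⟨c, _, rfl⟩
        exact hevnd.1
    rw [ih hevnd.2 _ hk1 hdisj1, h1, List.flatMap_cons, List.append_assoc]

lemma portA_eq_target (allEvents : List String) (traces : List (List String))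
    (hA : allEvents.Nodup) :
    getFollowsRelations allEvents traces
      = (targetItems allEvents traces).map (fun p => (p.1.1, p.1.2, p.2)) := by
  unfold getFollowsRelations targetItems
  rw [outerA_items allEvents traces hA allEvents hA PySem.Dict.empty
    (by rw [PySem.Dict.keys_empty]; exact List.nodup_nil)
    (by rw [PySem.Dict.keys_empty]; intro k h; cases h)]
  rfl

lemma portB_eq_target (allEvents : List String) (traces : List (List String))
    (hA : allEvents.Nodup) :
    getFollowsRelations_alt allEvents traces
      = (targetItems allEvents traces).map (fun p => (p.1.1, p.1.2, p.2)) := by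
  show ((allEvents.foldl (fun res e1 =>
      allEvents.foldl (fun res e2 => res.insert (e1, e2) (labB traces e1 e2)) res)
      PySem.Dict.empty).items).map (fun p => (p.1.1, p.1.2, p.2))
    = (targetItems allEvents traces).map (fun p => (p.1.1, p.1.2, p.2))
  rw [outerB_items allEvents hA (labB traces) allEvents hA PySem.Dict.empty
    (by rw [PySem.Dict.keys_empty]; exact List.nodup_nil)
    (by rw [PySem.Dict.keys_empty]; intro k h; cases h)]
  rw [show labB traces = fun e1 e2 => labT traces e1 e2 from
    funext fun e1 => funext fun e2 => labB_eq traces e1 e2]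
  rfl

-- ===== VERDICT (by name: the statement is the Claim_ definition above) =====
theorem getFollowsRelations_spec : Claim_equal_getFollowsRelations := by
  intro allEvents traces _hDom hPre
  unfold Spec_getFollowsRelations
  rw [portA_eq_target allEvents traces hPre, portB_eq_target allEvents traces hPre]
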